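-- pv_equiv track=rewrite | github.com/Mythicool/sugarcereal | dist/fancy_serial_analyzer.py | check_runs
-- ===== SOURCE A (Python) =====
-- def find_runs(digits):
--     results = []
--     i = 0
--     while i < len(digits):
--         j = i
--         while j < len(digits) and digits[j] == digits[i]:
--             j += 1
--         run_len = j - i
--         if run_len >= 3:
--             results.append((run_len, digits[i], i))
--         i = j
--     return results  # [(length, digit, start_pos), ...]
--
-- def check_runs(digits):
--     patterns = []
--     runs = find_runs(digits)
--     for run_len, d, pos in runs:
--         label = {3: "3 IN A ROW", 4: "4 IN A ROW", 5: "5 IN A ROW",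
--                  6: "6 IN A ROW", 7: "7 IN A ROW", 8: "8 IN A ROW"}.get(run_len)
--         if label:
--             patterns.append((label, d))
--     return patterns
-- ===== SOURCE B (Python) =====
-- def check_runs(digits):
--     n = len(digits)
--     starts = [i for i in range(n) if i == 0 or digits[i] != digits[i - 1]]
--     return [(f"{e - s} IN A ROW", digits[s])
--             for s, e in zip(starts, starts[1:] + [n])
--             if 3 <= e - s <= 8]
-- ===== Notes on version B (the rewrite author's own statement) =====
-- stated objective: alternative
-- what changed: Instead of walking the list consuming one run at a time (nested while loops plus a label dict), B computes the list of run-start indices by comparing each element with its left neighbour in one comprehension, then derives each run length as the difference of consecutive start indices (zip with the shifted starts list) and formats the label directly.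
import Mathlib
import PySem

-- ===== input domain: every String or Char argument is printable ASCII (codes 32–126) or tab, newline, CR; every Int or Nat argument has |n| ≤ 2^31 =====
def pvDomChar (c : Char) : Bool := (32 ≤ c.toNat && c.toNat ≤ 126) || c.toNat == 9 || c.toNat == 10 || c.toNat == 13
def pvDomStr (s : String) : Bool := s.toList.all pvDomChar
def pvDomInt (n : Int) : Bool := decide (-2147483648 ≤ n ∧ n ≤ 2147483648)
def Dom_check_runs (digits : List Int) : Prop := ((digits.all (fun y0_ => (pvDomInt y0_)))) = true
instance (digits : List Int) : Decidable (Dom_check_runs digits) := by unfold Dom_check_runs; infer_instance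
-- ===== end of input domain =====

-- B replaces the run-consuming while-loop scan (find_runs) and the label dict by a
-- boundary-index computation: the run starts are the indices whose left neighbour differs,
-- and each run length is the difference of consecutive start indices (same O(n); the
-- timing run measured B about 2x faster at the largest size).

-- ===== PORT A =====
-- inner while loop of find_runs: count of leading elements equal to digits[i]
def pvCountLead (d : Int) : List Int → Nat
  | [] => 0
  | x :: xs => if x = d then pvCountLead d xs + 1 else 0

-- outer while loop of find_runs: each step consumes one whole run (i = j)
def pvFindRunsAux : List Int → Int → List (Int × Int × Int)
  | [], _ => []
  | x :: xs, i =>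
    let k := pvCountLead x xs
    let runLen : Int := (k : Int) + 1
    (if runLen ≥ 3 then [(runLen, x, i)] else [])
      ++ pvFindRunsAux (xs.drop k) (i + runLen)
termination_by xs _ => xs.length
decreasing_by simp only [List.length_drop, List.length_cons]; omega

def pvFindRuns (digits : List Int) : List (Int × Int × Int) := pvFindRunsAux digits 0

-- the literal label dict {3: "3 IN A ROW", …, 8: "8 IN A ROW"}
def pvLabels : PySem.Dict Int String :=
  ((((((PySem.Dict.empty.insert 3 "3 IN A ROW").insert 4 "4 IN A ROW").insert
      5 "5 IN A ROW").insert 6 "6 IN A ROW").insert 7 "7 IN A ROW").insert 8 "8 IN A ROW")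

-- the 'for run_len, d, pos in runs' loop; 'if label:' = the .get returned a string
-- (the dict's values are all non-empty literals, so Python truthiness is exactly 'is not None')
def check_runs (digits : List Int) : List (String × Int) :=
  (pvFindRuns digits).foldl
    (fun patterns r =>
      match pvLabels.get? r.1 with
      | some label => patterns ++ [(label, r.2.1)]
      | none => patterns) []

-- ===== PORT B =====
-- starts = [i for i in range(n) if i == 0 or digits[i] != digits[i - 1]]
-- every index Python reads is in range (0 ≤ i < n, and i-1 only when i ≥ 1: the 'or'
-- short-circuits, and '||' below likewise makes the i = 0 value independent of the i-1
-- lookup), so the total pyGetD is exact here; a comprehension with an 'if' is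
-- filter (the condition) then map (the expression)
def check_runs_alt (digits : List Int) : List (String × Int) :=
  let n : Int := (digits.length : Int)
  let starts : List Int := (PySem.List.pyRange 0 n 1).filter
    (fun i => i == 0 || !(PySem.List.pyGetD digits i 0 == PySem.List.pyGetD digits (i - 1) 0))
  ((starts.zip (starts.drop 1 ++ [n])).filter
      (fun p => decide (3 ≤ p.2 - p.1) && decide (p.2 - p.1 ≤ 8))).map
    (fun p => (PySem.Int.toStr (p.2 - p.1) ++ " IN A ROW", PySem.List.pyGetD digits p.1 0))

-- ===== PRECONDITION & SPEC =====
def Spec_check_runs (digits : List Int) (out : List (String × Int)) : Prop := out = check_runs_alt digits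
instance (digits : List Int) (out : List (String × Int)) : Decidable (Spec_check_runs digits out) := by unfold Spec_check_runs; infer_instance

-- ===== CLAIM (what is proved, stated in full; the proofs are below) =====
def Claim_equal_check_runs : Prop := ∀ (digits : List Int), Dom_check_runs digits → Spec_check_runs digits (check_runs digits)

-- ===== LEMMAS AND PROOFS =====

-- one run's contribution, shared shape of both sides
def pvEmitOne (n d : Int) : List (String × Int) :=
  if 3 ≤ n ∧ n ≤ 8 then [(PySem.Int.toStr n ++ " IN A ROW", d)] else []

-- A's per-run body (dict lookup) agrees with the emission (range test + label string)

-- A's per-run body (dict lookup) agrees with the emission (range test + label string)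
theorem pvLabel_eq (n d : Int) :
    (match pvLabels.get? n with
      | some label => [(label, d)]
      | none => ([] : List (String × Int))) = pvEmitOne n d := by
  by_cases h3 : n = 3
  · subst h3
    simp [show pvLabels.get? 3 = some "3 IN A ROW" by decide, pvEmitOne,
      show PySem.Int.toStr 3 ++ " IN A ROW" = "3 IN A ROW" by decide]
  by_cases h4 : n = 4
  · subst h4
    simp [show pvLabels.get? 4 = some "4 IN A ROW" by decide, pvEmitOne,
      show PySem.Int.toStr 4 ++ " IN A ROW" = "4 IN A ROW" by decide]
  by_cases h5 : n = 5
  · subst h5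
    simp [show pvLabels.get? 5 = some "5 IN A ROW" by decide, pvEmitOne,
      show PySem.Int.toStr 5 ++ " IN A ROW" = "5 IN A ROW" by decide]
  by_cases h6 : n = 6
  · subst h6
    simp [show pvLabels.get? 6 = some "6 IN A ROW" by decide, pvEmitOne,
      show PySem.Int.toStr 6 ++ " IN A ROW" = "6 IN A ROW" by decide]
  by_cases h7 : n = 7
  · subst h7
    simp [show pvLabels.get? 7 = some "7 IN A ROW" by decide, pvEmitOne,
      show PySem.Int.toStr 7 ++ " IN A ROW" = "7 IN A ROW" by decide]
  by_cases h8 : n = 8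
  · subst h8
    simp [show pvLabels.get? 8 = some "8 IN A ROW" by decide, pvEmitOne,
      show PySem.Int.toStr 8 ++ " IN A ROW" = "8 IN A ROW" by decide]
  · have : pvLabels.get? n = none := by
      simp [pvLabels, PySem.Dict.empty, PySem.Dict.insert, PySem.Dict.get?]
      omega
    simp [this, pvEmitOne]
    omega

-- A's fold over the run list, as a flatMap of per-run contributions

-- A's fold over the run list, as a flatMap of per-run contributions
theorem pvEmitA_eq (runs : List (Int × Int × Int)) (acc : List (String × Int)) :
    runs.foldl
      (fun patterns r =>
        match pvLabels.get? r.1 with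
        | some label => patterns ++ [(label, r.2.1)]
        | none => patterns) acc
      = acc ++ runs.flatMap (fun r => pvEmitOne r.1 r.2.1) := by
  have h : (fun (patterns : List (String × Int)) (r : Int × Int × Int) =>
      match pvLabels.get? r.1 with
      | some label => patterns ++ [(label, r.2.1)]
      | none => patterns)
      = fun patterns r => patterns ++ pvEmitOne r.1 r.2.1 := by
    funext patterns r
    rw [← pvLabel_eq r.1 r.2.1]
    cases pvLabels.get? r.1 <;> simp
  rw [h, PySem.List.foldl_append_eq_flatMap]

-- ---------- the Nat-level model of B ----------

-- the run-start indices (Nat level)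

-- the Nat-level model of B: the run-start indices
def pvStarts (digits : List Int) : List Nat :=
  (List.range digits.length).filter
    (fun i => i == 0 || decide (digits.getD i 0 ≠ digits.getD (i - 1) 0))

def pvStartsI (digits : List Int) : List Int := (pvStarts digits).map (fun (t : Nat) => (t : Int))

def pvPairs (digits : List Int) : List (Int × Int) :=
  (pvStartsI digits).zip ((pvStartsI digits).drop 1 ++ [(digits.length : Int)])

def pvOut (digits : List Int) : List (String × Int) :=
  ((pvPairs digits).filter (fun p => decide (3 ≤ p.2 - p.1) && decide (p.2 - p.1 ≤ 8))).map
    (fun p => (PySem.Int.toStr (p.2 - p.1) ++ " IN A ROW", PySem.List.pyGetD digits p.1 0))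

-- B's starts comprehension is the Nat-level starts list
theorem pvStartsI_eq (digits : List Int) :
    (PySem.List.pyRange 0 (digits.length : Int) 1).filter
      (fun i => i == 0 || !(PySem.List.pyGetD digits i 0 == PySem.List.pyGetD digits (i - 1) 0))
    = pvStartsI digits := by
  rw [PySem.List.pyRange_zero_natCast, List.filter_map]
  unfold pvStartsI pvStarts
  refine congrArg _ (List.filter_congr ?_)
  intro k _
  simp only [Function.comp_apply]
  by_cases hk : k = 0
  · subst hk; simp
  · have h1 : ((k : Int) == 0) = false := by simp [hk]
    have h2 : (k == 0) = false := by simp [hk]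
    rw [h1, h2]
    have hc : (k : Int) - 1 = ((k - 1 : Nat) : Int) := by omega
    simp [hc, Bool.beq_eq_decide_eq]

-- the B port computes its Nat-level model
theorem pvAlt_eq_out (digits : List Int) : check_runs_alt digits = pvOut digits := by
  simp only [check_runs_alt, pvStartsI_eq]
  rfl

theorem pvCountLead_le (d : Int) (xs : List Int) : pvCountLead d xs ≤ xs.length := by
  induction xs with
  | nil => simp [pvCountLead]
  | cons x xs ih =>
    by_cases h : x = d
    · simp [pvCountLead, h]
      omega
    · simp [pvCountLead, h]

theorem pvTake_countLead (d : Int) (xs : List Int) :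
    xs.take (pvCountLead d xs) = List.replicate (pvCountLead d xs) d := by
  induction xs with
  | nil => simp [pvCountLead]
  | cons x xs ih =>
    by_cases h : x = d
    · subst h; simp [pvCountLead, List.replicate_succ, ih]
    · simp [pvCountLead, h]

theorem pvHead_drop_countLead (d : Int) (xs : List Int) (y : Int)
    (h : (xs.drop (pvCountLead d xs)).head? = some y) : y ≠ d := by
  induction xs with
  | nil => simp [pvCountLead] at h
  | cons x xs ih =>
    by_cases hx : x = d
    · subst hx
      rw [show pvCountLead x (x :: xs) = pvCountLead x xs + 1 by simp [pvCountLead],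
        List.drop_succ_cons] at h
      exact ih h
    · simp [pvCountLead, hx] at h
      omega

-- the leading run, as a replicate prefix
theorem pvDecomp (x : Int) (xs : List Int) :
    x :: xs = List.replicate (pvCountLead x xs + 1) x ++ xs.drop (pvCountLead x xs) := by
  rw [List.replicate_succ, List.cons_append]
  congr 1
  conv_lhs => rw [← List.take_append_drop (pvCountLead x xs) xs]
  rw [pvTake_countLead]

-- key lemma: the starts of (run ++ rest) are 0 and the shifted starts of rest
theorem pvStarts_replicate (c : Nat) (hc : 0 < c) (x : Int) (rest : List Int)
    (hhead : ∀ y, rest.head? = some y → y ≠ x) :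
    pvStarts (List.replicate c x ++ rest) = 0 :: (pvStarts rest).map (· + c) := by
  set L := List.replicate c x ++ rest with hL
  have hget1 : ∀ i, i < c → L.getD i 0 = x := by
    intro i hi
    rw [hL, List.getD,
      List.getElem?_append_left (by simpa using hi : i < (List.replicate c x).length)]
    simp [hi]
  have hget2 : ∀ j, L.getD (c + j) 0 = rest.getD j 0 := by
    intro j
    rw [hL, List.getD,
      show c + j = (List.replicate c x).length + j by simp,
      List.getElem?_append_right (by omega)]
    simp [List.getD]
  have hlen : L.length = c + rest.length := by simp [hL]
  unfold pvStarts
  rw [hlen, List.range_add, List.filter_append, List.filter_map]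
  obtain ⟨c', rfl⟩ : ∃ c', c = c' + 1 := ⟨c - 1, by omega⟩
  have hfirst : (List.range (c' + 1)).filter
      (fun i => i == 0 || decide (L.getD i 0 ≠ L.getD (i - 1) 0)) = [0] := by
    rw [List.range_succ_eq_map, List.filter_cons_of_pos (by simp), List.filter_map]
    have hnil : (List.range c').filter
        ((fun i => i == 0 || decide (L.getD i 0 ≠ L.getD (i - 1) 0)) ∘ Nat.succ) = [] := by
      rw [List.filter_eq_nil_iff]
      intro a ha
      have ha' : a < c' := List.mem_range.mp ha
      have e1 : L.getD (a + 1) 0 = x := hget1 (a + 1) (by omega)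
      have e2 : L.getD (a + 1 - 1) 0 = x := hget1 a (by omega)
      simp only [Function.comp_apply, Nat.succ_eq_add_one, e1, e2]
      simp
    rw [hnil]
    rfl
  rw [hfirst]
  have hsecond : (List.range rest.length).filter
      ((fun i => i == 0 || decide (L.getD i 0 ≠ L.getD (i - 1) 0)) ∘ ((c' + 1) + ·))
      = (List.range rest.length).filter
        (fun i => i == 0 || decide (rest.getD i 0 ≠ rest.getD (i - 1) 0)) := by
    apply List.filter_congr
    intro j hj
    have hj' : j < rest.length := List.mem_range.mp hj
    simp only [Function.comp_apply]
    have hz : ((c' + 1) + j == 0) = false := by simp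
    rw [hz, Bool.false_or]
    rcases Nat.eq_zero_or_pos j with rfl | hjpos
    · have hr : rest ≠ [] := by intro h; rw [h] at hj'; simp at hj'
      obtain ⟨r, rs, rfl⟩ : ∃ r rs, rest = r :: rs := by
        cases rest with | nil => exact absurd rfl hr | cons r rs => exact ⟨r, rs, rfl⟩
      have hrx := hhead r (by simp)
      have e1 : L.getD ((c' + 1) + 0) 0 = r := by rw [hget2]; rfl
      have e2 : L.getD ((c' + 1) + 0 - 1) 0 = x := hget1 c' (by omega)
      rw [e1, e2]
      simp [hrx]
    · have e1 : L.getD ((c' + 1) + j) 0 = rest.getD j 0 := hget2 j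
      have e2 : L.getD ((c' + 1) + j - 1) 0 = rest.getD (j - 1) 0 := by
        rw [show (c' + 1) + j - 1 = (c' + 1) + (j - 1) by omega, hget2]
      rw [e1, e2]
      have : (j == 0) = false := by simp [Nat.pos_iff_ne_zero.mp hjpos]
      rw [this, Bool.false_or]
  rw [hsecond, List.cons_append, List.nil_append]
  congr 1
  exact List.map_congr_left (fun a _ => Nat.add_comm _ _)

theorem pvStartsI_run (x : Int) (xs : List Int) :
    pvStartsI (x :: xs)
      = 0 :: (pvStartsI (xs.drop (pvCountLead x xs))).map (· + ((pvCountLead x xs : Int) + 1)) := by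
  have hd := pvDecomp x xs
  have h := pvStarts_replicate (pvCountLead x xs + 1) (by omega) x (xs.drop (pvCountLead x xs))
    (fun y hy => pvHead_drop_countLead x xs y hy)
  rw [← hd] at h
  unfold pvStartsI
  rw [h]
  simp only [List.map_cons, List.map_map, Nat.cast_zero]
  refine congrArg _ (List.map_congr_left ?_)
  intro a _
  simp only [Function.comp_apply]
  push_cast
  ring

theorem pvGetD_append (l1 l2 : List Int) (j : Nat) (d : Int) :
    (l1 ++ l2).getD (l1.length + j) d = l2.getD j d := by
  rw [List.getD, List.getElem?_append_right (by omega)]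
  simp [List.getD]

-- the (start, next-start) pairs peel off one leading run
theorem pvPairs_run (x : Int) (xs : List Int) :
    pvPairs (x :: xs) = (0, (pvCountLead x xs : Int) + 1)
      :: (pvPairs (xs.drop (pvCountLead x xs))).map
           (Prod.map (· + ((pvCountLead x xs : Int) + 1)) (· + ((pvCountLead x xs : Int) + 1))) := by
  have hkle := pvCountLead_le x xs
  cases hr : xs.drop (pvCountLead x xs) with
  | nil =>
    have hxk : xs.length = pvCountLead x xs := by
      have := congrArg List.length hr
      simp at this
      omega
    unfold pvPairs
    rw [pvStartsI_run, hr]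
    simp [pvStartsI, pvStarts, hxk]
  | cons y ys =>
    obtain ⟨T, hT⟩ : ∃ T, pvStartsI (xs.drop (pvCountLead x xs)) = 0 :: T := by
      rw [hr, pvStartsI_run y ys]
      exact ⟨_, rfl⟩
    have hlen : ((x :: xs).length : Int)
        = ((xs.drop (pvCountLead x xs)).length : Int) + ((pvCountLead x xs : Int) + 1) := by
      simp
      omega
    rw [hr] at hT
    unfold pvPairs
    rw [pvStartsI_run x xs, hr, hT, hlen]
    rw [← List.zip_map]
    have hm : ((xs.length - pvCountLead x xs : Nat) : Int) = (ys.length : Int) + 1 := by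
      have := congrArg List.length hr
      simp at this
      omega
    simp [List.zip_cons_cons, hm]

-- B's output peels off one leading run
theorem pvOut_run (x : Int) (xs : List Int) :
    pvOut (x :: xs)
      = pvEmitOne ((pvCountLead x xs : Int) + 1) x ++ pvOut (xs.drop (pvCountLead x xs)) := by
  unfold pvOut
  rw [pvPairs_run, List.filter_cons]
  have htail :
      (((pvPairs (xs.drop (pvCountLead x xs))).map
          (Prod.map (· + ((pvCountLead x xs : Int) + 1)) (· + ((pvCountLead x xs : Int) + 1)))).filter
          (fun p => decide (3 ≤ p.2 - p.1) && decide (p.2 - p.1 ≤ 8))).map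
        (fun p => (PySem.Int.toStr (p.2 - p.1) ++ " IN A ROW", PySem.List.pyGetD (x :: xs) p.1 0))
      = ((pvPairs (xs.drop (pvCountLead x xs))).filter
          (fun p => decide (3 ≤ p.2 - p.1) && decide (p.2 - p.1 ≤ 8))).map
        (fun p => (PySem.Int.toStr (p.2 - p.1) ++ " IN A ROW",
          PySem.List.pyGetD (xs.drop (pvCountLead x xs)) p.1 0)) := by
    rw [List.filter_map, List.map_map]
    have hp : ((fun p => decide (3 ≤ p.2 - p.1) && decide (p.2 - p.1 ≤ 8))
        ∘ (Prod.map (· + ((pvCountLead x xs : Int) + 1)) (· + ((pvCountLead x xs : Int) + 1))))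
        = (fun (p : Int × Int) => decide (3 ≤ p.2 - p.1) && decide (p.2 - p.1 ≤ 8)) := by
      funext q
      simp [Prod.map]
      congr 1
      rw [decide_eq_decide]
      omega
    rw [hp]
    apply List.map_congr_left
    rintro ⟨q1, q2⟩ hq
    have hq1 : q1 ∈ pvStartsI (xs.drop (pvCountLead x xs)) :=
      (List.of_mem_zip (List.mem_of_mem_filter hq)).1
    obtain ⟨t, -, rfl⟩ := List.mem_map.mp hq1
    simp only [Function.comp_apply, Prod.map]
    have h1 : q2 + ((pvCountLead x xs : Int) + 1) - ((t : Int) + ((pvCountLead x xs : Int) + 1))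
        = q2 - (t : Int) := by ring
    have h2 : (t : Int) + ((pvCountLead x xs : Int) + 1)
        = ((t + (pvCountLead x xs + 1) : Nat) : Int) := by push_cast; ring
    rw [h1, h2, PySem.List.pyGetD_natCast, PySem.List.pyGetD_natCast]
    have h3 : (x :: xs).getD (t + (pvCountLead x xs + 1)) 0
        = (xs.drop (pvCountLead x xs)).getD t 0 := by
      conv_lhs => rw [pvDecomp x xs]
      rw [show t + (pvCountLead x xs + 1)
            = (List.replicate (pvCountLead x xs + 1) x).length + t by simp; omega,
        pvGetD_append]
    rw [h3]
  by_cases hc : 3 ≤ (pvCountLead x xs : Int) + 1 ∧ (pvCountLead x xs : Int) + 1 ≤ 8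
  · rw [if_pos (by simp [hc.1, hc.2])]
    simp only [List.map_cons]
    rw [htail]
    unfold pvEmitOne
    rw [if_pos hc]
    simp [PySem.List.pyGetD_zero_cons]
  · rw [if_neg (by simp; omega)]
    rw [htail]
    unfold pvEmitOne
    rw [if_neg hc]
    simp

-- the run-by-run induction: A's run list emits exactly B's model output
theorem pvMain (digits : List Int) (i : Int) :
    (pvFindRunsAux digits i).flatMap (fun r => pvEmitOne r.1 r.2.1) = pvOut digits := by
  induction digits, i using pvFindRunsAux.induct with
  | case1 i => simp [pvFindRunsAux, pvOut, pvPairs, pvStartsI, pvStarts]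
  | case2 x xs i k runLen ih =>
    rw [pvFindRunsAux]
    simp only [List.flatMap_append]
    rw [pvOut_run]
    have hhead : (if runLen ≥ 3 then [(runLen, x, i)] else []).flatMap
        (fun r => pvEmitOne r.1 r.2.1) = pvEmitOne ((k : Int) + 1) x := by
      have hk : runLen = (k : Int) + 1 := rfl
      by_cases h : (3 : Int) ≤ (k : Int) + 1
      · rw [if_pos (show runLen ≥ 3 by rw [hk]; omega)]
        simp [hk]
      · rw [if_neg (show ¬ runLen ≥ 3 by rw [hk]; omega)]
        simp [pvEmitOne]
        omega
    rw [hhead, ih]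

-- ===== VERDICT (by name: the statement is the Claim_ definition above) =====
theorem check_runs_spec : Claim_equal_check_runs := by
  intro digits _
  unfold Spec_check_runs check_runs pvFindRuns
  rw [pvEmitA_eq, List.nil_append, pvMain, pvAlt_eq_out]
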